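-- pv_equiv track=rewrite | github.com/ThomasTrepanier/log6307-final-project | data/pyscent/stackoverflow/code-dump/20756_6.py | new_line
-- ===== SOURCE A (Python) =====
-- def new_line(sentence: str):
--     # characters that mark the end of a sentence
--     end_of_sentence_markers = ['.', '!', '?', '...']
--     # after n sentences insert new_line
--     n = 5
--
--     # keeps track
--     count = 0
--     # final string as list for efficiency
--     final_str = []
--     # split at space
--     sentence_split = sentence.split(' ')
--
--     # traverse the sentence split
--     for word in sentence_split:
--         # if end of sentence is present then increase count
--         if word[-1] in end_of_sentence_markers:
--             count += 1
--         # if count is equal to n then add newline otherwise add space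
--         if count == n:
--             final_str.append(word + '\n')
--             count = 0
--         else:
--             final_str.append(word + ' ')
--
--
--     # return the string version of the list
--     return ''.join(final_str)
-- ===== SOURCE B (Python) =====
-- def new_line(sentence: str):
--     # Two staged passes over an index table: pass 1 collects the indices of
--     # sentence-ending words and keeps every 5th one as a break position;
--     # pass 2 assembles the output by looking each word's index up in that table.
--     words = sentence.split(' ')
--     marks = [i for i, w in enumerate(words) if w[-1] in ('.', '!', '?')]
--     breaks = {i for k, i in enumerate(marks) if k % 5 == 4}
--     return ''.join(w + ('\n' if i in breaks else ' ') for i, w in enumerate(words))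
-- ===== Notes on version B (the rewrite author's own statement) =====
-- stated objective: alternative
-- what changed: B replaces A's single interleaved loop (reset-at-5 counter deciding each separator as it emits) with two staged passes: it first builds an index table of break positions (every 5th sentence-ending word index, via enumerate+slice-by-count into a set), then assembles the output by joining each word with a separator looked up by index.
import Mathlib
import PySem

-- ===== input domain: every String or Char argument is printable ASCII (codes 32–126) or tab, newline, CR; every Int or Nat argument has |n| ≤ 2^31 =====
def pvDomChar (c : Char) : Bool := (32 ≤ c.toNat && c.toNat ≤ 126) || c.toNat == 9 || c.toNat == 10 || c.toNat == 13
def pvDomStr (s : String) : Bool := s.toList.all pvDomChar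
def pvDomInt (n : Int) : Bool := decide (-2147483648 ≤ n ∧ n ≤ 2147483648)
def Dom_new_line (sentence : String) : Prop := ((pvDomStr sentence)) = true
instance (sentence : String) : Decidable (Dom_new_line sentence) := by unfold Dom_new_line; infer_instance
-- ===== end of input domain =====

-- B restructures A's single interleaved loop into two staged passes: an index table of
-- break positions first, then assembly by index lookup (objective: alternative).

-- ===== PORT A =====
-- `word[-1] in end_of_sentence_markers`; pyGet? = none is Python's IndexError (outside Pre_)
def newLineHit (word : List Char) : Bool :=
  match PySem.List.pyGet? word (-1) with
  | some c => ([['.'], ['!'], ['?'], ['.', '.', '.']] : List (List Char)).contains [c]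
  | none => false

def newLineStepA (st : Int × List (List Char)) (word : List Char) : Int × List (List Char) :=
  let count : Int := if newLineHit word then st.1 + 1 else st.1
  if count = 5 then (0, st.2 ++ [word ++ ['\n']])
  else (count, st.2 ++ [word ++ [' ']])

def new_line (sentence : String) : String :=
  let sentence_split := PySem.Chars.splitOn sentence.toList [' ']
  let final := sentence_split.foldl newLineStepA (0, [])
  String.ofList (PySem.Chars.join [] final.2)

-- ===== PORT B =====
-- `w[-1] in ('.', '!', '?')` (pyGet? = none is Python's IndexError, outside Pre_)
def isMarkB (w : List Char) : Bool :=
  match PySem.List.pyGet? w (-1) with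
  | some c => (['.', '!', '?'] : List Char).contains c
  | none => false

def new_line_alt (sentence : String) : String :=
  let words := PySem.Chars.splitOn sentence.toList [' ']
  let marks := ((PySem.List.enumerate words 0).filter (fun p => isMarkB p.2)).map (·.1)
  let breaks : PySem.Set Int :=
    PySem.Set.ofList (((PySem.List.enumerate marks 0).filter
      (fun p => PySem.Int.mod p.1 5 == 4)).map (·.2))
  String.ofList (PySem.Chars.join []
    ((PySem.List.enumerate words 0).map
      (fun p => p.2 ++ [if PySem.Set.contains breaks p.1 then '\n' else ' '])))

-- ===== PRECONDITION & SPEC =====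
-- Pre_ excludes exactly the inputs where A raises IndexError (word[-1] on an empty word):
-- those whose space-split contains an empty word (empty string, leading/trailing or doubled spaces).
def Pre_new_line (sentence : String) : Prop :=
  ∀ w ∈ PySem.Chars.splitOn sentence.toList [' '], w ≠ []
instance (sentence : String) : Decidable (Pre_new_line sentence) := by unfold Pre_new_line; infer_instance

def pvWitness_new_line : String := "One. Two. Three. Four. Five. Six."

def Spec_new_line (sentence : String) (out : String) : Prop := out = new_line_alt sentence
instance (sentence : String) (out : String) : Decidable (Spec_new_line sentence out) := by unfold Spec_new_line; infer_instance

-- ===== CLAIM (what is proved, stated in full; the proofs are below) =====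
def Claim_equal_new_line : Prop := ∀ (sentence : String), Dom_new_line sentence → Pre_new_line sentence → Spec_new_line sentence (new_line sentence)

-- ===== LEMMAS AND PROOFS =====

-- A's four-marker membership on word[-1] equals B's three-marker one (single char ≠ '...')
lemma hit_eq_mark (w : List Char) : newLineHit w = isMarkB w := by
  unfold newLineHit isMarkB
  cases PySem.List.pyGet? w (-1) with
  | none => rfl
  | some c => simp

-- reference: the separator after a word is '\n' iff the word is a marker and the number of
-- markers seen strictly before it is ≡ 4 (mod 5)
def refNL : Nat → List (List Char) → List (List Char)
  | _, [] => []
  | c, w :: ws =>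
    if isMarkB w then (w ++ [if c % 5 = 4 then '\n' else ' ']) :: refNL (c + 1) ws
    else (w ++ [' ']) :: refNL c ws

-- A's loop computes refNL: its counter is the prior marker count mod 5
lemma foldA_eq_ref : ∀ (ws : List (List Char)) (c : Nat) (acc : List (List Char)),
    (ws.foldl newLineStepA (((c % 5 : Nat) : Int), acc)).2 = acc ++ refNL c ws := by
  intro ws
  induction ws with
  | nil => intro c acc; simp [refNL]
  | cons w ws ih =>
    intro c acc
    simp only [List.foldl_cons, newLineStepA, refNL, hit_eq_mark]
    cases hM : isMarkB w with
    | false =>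
      have h5 : ¬ (((c % 5 : Nat) : Int) = 5) := by omega
      simp only [Bool.false_eq_true, if_false, if_neg h5]
      simpa using ih c (acc ++ [w ++ [' ']])
    | true =>
      simp only [if_true]
      by_cases h4 : c % 5 = 4
      · have h5 : ((c % 5 : Nat) : Int) + 1 = 5 := by omega
        have h0 : (0 : Int) = (((c + 1) % 5 : Nat) : Int) := by omega
        rw [if_pos h5, if_pos h4, h0]
        simpa using ih (c + 1) (acc ++ [w ++ ['\n']])
      · have h5 : ¬ (((c % 5 : Nat) : Int) + 1 = 5) := by omega
        have h1 : ((c % 5 : Nat) : Int) + 1 = (((c + 1) % 5 : Nat) : Int) := by omega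
        rw [if_neg h5, if_neg h4, h1]
        simpa using ih (c + 1) (acc ++ [w ++ [' ']])

-- the two composed passes of B, as proof-side abbreviations
def marksFrom (s : Int) (ws : List (List Char)) : List Int :=
  ((PySem.List.enumerate ws s).filter (fun p => isMarkB p.2)).map (·.1)

def selFrom (c : Int) (l : List Int) : List Int :=
  ((PySem.List.enumerate l c).filter (fun p => PySem.Int.mod p.1 5 == 4)).map (·.2)

lemma marksFrom_cons (s : Int) (w : List Char) (ws : List (List Char)) :
    marksFrom s (w :: ws)
      = (if isMarkB w then [s] else []) ++ marksFrom (s + 1) ws := by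
  cases h : isMarkB w <;> simp [marksFrom, PySem.List.enumerate_cons, h]

lemma selFrom_cons (c x : Int) (l : List Int) :
    selFrom c (x :: l) = (if PySem.Int.mod c 5 == 4 then [x] else []) ++ selFrom (c + 1) l := by
  have hm : PySem.Int.mod c 5 = c % 5 := PySem.Int.mod_eq_emod_of_pos (by norm_num)
  cases h : ((c % 5 : Int) == 4) <;> simp [selFrom, PySem.List.enumerate_cons, h]

lemma selFrom_append (c : Int) (l₁ l₂ : List Int) :
    selFrom c (l₁ ++ l₂) = selFrom c l₁ ++ selFrom (c + l₁.length) l₂ := by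
  simp [selFrom, PySem.List.enumerate_append]

-- membership in the break table: i is a break position iff word i is a marker and the
-- marker count strictly before i is ≡ 4 (mod 5) (offsets s, c generalised for the induction)
lemma mem_sel_marks : ∀ (ws : List (List Char)) (s c : Nat) (i : Int),
    i ∈ selFrom (c : Int) (marksFrom (s : Int) ws)
      ↔ ∃ (j : Nat) (h : j < ws.length), i = (s : Int) + j ∧ isMarkB ws[j] = true ∧
          (c + (ws.take j).countP isMarkB) % 5 = 4 := by
  intro ws
  induction ws with
  | nil => intro s c i; simp [marksFrom, selFrom, PySem.List.enumerate_nil]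
  | cons w ws ih =>
    intro s c i
    rw [marksFrom_cons]
    cases hM : isMarkB w with
    | false =>
      simp only [Bool.false_eq_true, if_false, List.nil_append]
      have := ih (s + 1) c i
      rw [show ((s + 1 : Nat) : Int) = (s : Int) + 1 by push_cast; ring] at this
      rw [this]
      constructor
      · rintro ⟨j, hj, rfl, hm, hc⟩
        refine ⟨j + 1, by simpa using hj, by push_cast; ring, by simpa using hm, ?_⟩
        simpa [List.countP_cons, hM] using hc
      · rintro ⟨j, hj, rfl, hm, hc⟩
        cases j with
        | zero => simp_all
        | succ j =>
          refine ⟨j, by simpa using hj, by push_cast; ring, by simpa using hm, ?_⟩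
          simpa [List.countP_cons, hM] using hc
    | true =>
      simp only [if_true, selFrom_append, List.mem_append]
      have hsel : selFrom (c : Int) [(s : Int)] = if c % 5 = 4 then [(s : Int)] else [] := by
        rw [selFrom_cons]
        have h0 : selFrom ((c : Int) + 1) [] = [] := by
          simp [selFrom, PySem.List.enumerate_nil]
        have hmc : PySem.Int.mod (c : Int) 5 = ((c % 5 : Nat) : Int) := by
          exact_mod_cast PySem.Int.mod_natCast c 5
        rw [h0, List.append_nil, hmc]
        by_cases h4 : c % 5 = 4
        · simp [h4]
        · have hb : ¬ ((((c % 5 : Nat) : Int)) == 4) = true := by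
            simp only [beq_iff_eq]
            omega
          rw [if_neg hb, if_neg h4]
      have hlen : ((c : Int) + (([( s : Int)]).length : Int)) = ((c + 1 : Nat) : Int) := by
        simp
      rw [hsel]
      have := ih (s + 1) (c + 1) i
      rw [show ((s + 1 : Nat) : Int) = (s : Int) + 1 by push_cast; ring] at this
      rw [hlen, this]
      constructor
      · rintro (h | ⟨j, hj, rfl, hm, hc⟩)
        · have hc4 : c % 5 = 4 := by by_contra hc; simp [hc] at h
          have hi : i = (s : Int) := by have := h; simp [hc4] at this; exact this
          exact ⟨0, by simp, by simpa using hi, by simpa using hM, by simpa using hc4⟩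
        · refine ⟨j + 1, by simpa using hj, by push_cast; ring, by simpa using hm, ?_⟩
          simp [List.take_succ_cons, hM]
          omega
      · rintro ⟨j, hj, rfl, hm, hc⟩
        cases j with
        | zero =>
          left
          simp only [List.take_zero, List.countP_nil, Nat.add_zero] at hc
          simp [hc]
        | succ j =>
          right
          refine ⟨j, by simpa using hj, by push_cast; ring, by simpa using hm, ?_⟩
          simp [List.take_succ_cons, hM] at hc
          omega

-- B's assembly pass computes refNL, reading break positions off the table
lemma mapB_eq_ref (W : List (List Char)) (breaks : PySem.Set Int)
    (hB : ∀ (j : Nat) (h : j < W.length),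
        ((j : Int) ∈ breaks ↔ isMarkB W[j] = true ∧ (W.take j).countP isMarkB % 5 = 4)) :
    ∀ (k n : Nat), W.length - n ≤ k → n ≤ W.length →
    (PySem.List.enumerate (W.drop n) (n : Int)).map
        (fun p => p.2 ++ [if PySem.Set.contains breaks p.1 then '\n' else ' '])
      = refNL ((W.take n).countP isMarkB) (W.drop n) := by
  intro k
  induction k with
  | zero =>
    intro n hk hn
    have : W.drop n = [] := by
      apply List.drop_eq_nil_of_le; omega
    simp [this, PySem.List.enumerate_nil, refNL]
  | succ k ih =>
    intro n hk hn
    by_cases hlt : n < W.length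
    · rw [List.drop_eq_getElem_cons hlt, PySem.List.enumerate_cons, List.map_cons]
      have hmem : PySem.Set.contains breaks (n : Int) = true ↔ (n : Int) ∈ breaks :=
        PySem.Set.contains_iff breaks _
      have hrec := ih (n + 1) (by omega) (by omega)
      rw [show ((n : Int) + 1) = ((n + 1 : Nat) : Int) by push_cast; ring, hrec]
      cases hM : isMarkB W[n] with
      | true =>
        have htake : (W.take (n + 1)).countP isMarkB = (W.take n).countP isMarkB + 1 := by
          rw [List.take_add_one, List.getElem?_eq_getElem hlt, Option.toList_some,
            List.countP_append]
          simp only [List.countP_cons, List.countP_nil, hM, if_true]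
        by_cases h4 : (W.take n).countP isMarkB % 5 = 4
        · have hcon : PySem.Set.contains breaks (n : Int) = true :=
            hmem.mpr ((hB n hlt).mpr ⟨hM, h4⟩)
          rw [htake, hcon]
          simp [refNL, hM, h4]
        · have hcon : PySem.Set.contains breaks (n : Int) = false := by
            rw [Bool.eq_false_iff]
            intro hc
            exact h4 ((hB n hlt).mp (hmem.mp hc)).2
          rw [htake, hcon]
          simp [refNL, hM, h4]
      | false =>
        have htake : (W.take (n + 1)).countP isMarkB = (W.take n).countP isMarkB := by
          rw [List.take_add_one, List.getElem?_eq_getElem hlt, Option.toList_some,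
            List.countP_append]
          simp only [List.countP_cons, List.countP_nil, hM]
          simp
        have hcon : PySem.Set.contains breaks (n : Int) = false := by
          rw [Bool.eq_false_iff]
          intro hc
          have h1 := ((hB n hlt).mp (hmem.mp hc)).1
          rw [hM] at h1
          exact Bool.false_ne_true h1
        rw [htake, hcon]
        simp [refNL, hM]
    · have hdrop : W.drop n = [] := List.drop_eq_nil_of_le (by omega)
      simp [hdrop, PySem.List.enumerate_nil, refNL]

-- ===== VERDICT (by name: the statement is the Claim_ definition above) =====
theorem new_line_spec : Claim_equal_new_line := by
  intro sentence _ _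
  show new_line sentence = new_line_alt sentence
  set W := PySem.Chars.splitOn sentence.toList [' '] with hW
  have hA : (W.foldl newLineStepA (0, [])).2 = refNL 0 W := by
    simpa using foldA_eq_ref W 0 []
  have hB : ∀ (j : Nat) (h : j < W.length),
      ((j : Int) ∈ PySem.Set.ofList (selFrom 0 (marksFrom 0 W))
        ↔ isMarkB W[j] = true ∧ (W.take j).countP isMarkB % 5 = 4) := by
    intro j hj
    rw [PySem.Set.mem_ofList]
    have hms := mem_sel_marks W 0 0 (j : Int)
    simp only [Nat.cast_zero, zero_add] at hms
    rw [hms]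
    constructor
    · rintro ⟨j', hj', hji, hm, hc⟩
      have : j = j' := by exact_mod_cast hji
      subst this
      exact ⟨hm, hc⟩
    · rintro ⟨hm, hc⟩
      exact ⟨j, hj, rfl, hm, hc⟩
  have hBmap := mapB_eq_ref W (PySem.Set.ofList (selFrom 0 (marksFrom 0 W))) hB W.length 0
    (by omega) (by omega)
  simp only [List.drop_zero, List.take_zero, List.countP_nil, Nat.cast_zero] at hBmap
  show String.ofList (PySem.Chars.join [] (W.foldl newLineStepA (0, [])).2)
      = String.ofList (PySem.Chars.join []
          ((PySem.List.enumerate W 0).map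
            (fun p => p.2 ++ [if PySem.Set.contains
                (PySem.Set.ofList (selFrom 0 (marksFrom 0 W))) p.1 then '\n' else ' '])))
  rw [hA, hBmap]
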